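-- pv_equiv track=rewrite | github.com/kenneth-lee-ch/cpc | algorithms/core/cpc.py | find_all_path_nodes
-- ===== SOURCE A (Python) =====
-- from collections import deque
--
-- def find_all_path_nodes(adj_matrix, start, end):
--     def bfs(start_node):
--         # Initialize BFS structures
--         queue = deque([start_node])
--         visited = set([start_node])
--         reachability = set([start_node])
--
--         while queue:
--             current = queue.popleft()
--             # Explore all adjacent nodes
--             for neighbor, is_connected in enumerate(adj_matrix[current]):
--                 if is_connected != 0 and neighbor not in visited:
--                     visited.add(neighbor)
--                     queue.append(neighbor)
--                     reachability.add(neighbor)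
--         return reachability
--
--     # Perform BFS from both start and end nodes
--     reach_from_start = bfs(start)
--     reach_from_end = bfs(end)
--
--     # The intersection of both reachability sets contains all nodes that are on any path between start and end
--     all_path_nodes = reach_from_start.intersection(reach_from_end)
--     all_path_nodes = all_path_nodes - set([start])
--     all_path_nodes = all_path_nodes - set([end])
--     return all_path_nodes
-- ===== SOURCE B (Python) =====
-- def find_all_path_nodes(adj_matrix, start, end):
--     # Fixpoint closure: repeatedly expand the whole reachable list at once
--     # (every node's nonzero neighbors) and dedup with dict.fromkeys, until the
--     # list stops growing.  No queue, no stack, no incremental visited set.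
--     def closure(src):
--         order = [src]
--         while True:
--             expanded = order + [nb for node in order
--                                 for nb, w in enumerate(adj_matrix[node]) if w != 0]
--             new_order = list(dict.fromkeys(expanded))
--             if len(new_order) == len(order):
--                 return new_order
--             order = new_order
--
--     reach_start = closure(start)
--     reach_end = set(closure(end))
--     return {v for v in reach_start if v in reach_end and v != start and v != end}
-- ===== Notes on version B (the rewrite author's own statement) =====
-- stated objective: alternative
-- what changed: Replaces the per-node deque BFS with incremental visited set by a fixpoint closure: each round rebuilds the whole reachable list (list plus all nonzero neighbors of every node) and dedups it with dict.fromkeys until it stops growing; the intersection/subtraction pipeline becomes one comprehension over the start-side closure.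
-- outside the precondition, e.g. on find_all_path_nodes([[0, 0], [0, 0, 5]], 0, 0): A returns set(), B returns set()
import Mathlib
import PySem

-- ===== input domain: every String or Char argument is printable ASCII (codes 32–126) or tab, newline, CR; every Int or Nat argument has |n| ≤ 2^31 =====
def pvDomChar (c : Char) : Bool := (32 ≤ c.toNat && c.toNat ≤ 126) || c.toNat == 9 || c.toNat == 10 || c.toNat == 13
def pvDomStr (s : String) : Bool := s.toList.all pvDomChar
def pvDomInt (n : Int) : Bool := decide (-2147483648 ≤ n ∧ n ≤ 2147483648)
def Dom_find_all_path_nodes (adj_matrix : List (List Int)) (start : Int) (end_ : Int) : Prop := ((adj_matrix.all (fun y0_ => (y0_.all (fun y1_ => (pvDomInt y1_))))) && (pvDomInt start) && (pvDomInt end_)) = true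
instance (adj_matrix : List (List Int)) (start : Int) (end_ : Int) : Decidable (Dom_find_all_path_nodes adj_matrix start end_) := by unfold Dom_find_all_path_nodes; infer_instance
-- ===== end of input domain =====

-- B replaces A's deque-based incremental BFS by a fixpoint closure (repeatedly re-expand the
-- whole reachable list and dedup until it stops growing) — alternative algorithm, not faster.

-- ===== PORT A =====

-- total row-length sum; the '+ 2' fuel bound dominates the number of loop iterations of
-- both Pythons' while-loops on every input (a totality guard only, not part of the algorithm)
def pvRowLenSum (adj : List (List Int)) : Nat := adj.foldl (fun a r => a + r.length) 0

def pvFuel (adj : List (List Int)) : Nat := pvRowLenSum adj + 2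

-- body of A's inner 'for neighbor, is_connected in enumerate(adj_matrix[current])';
-- state = (queue, visited, reachability)
def pvA_inner (st : List Int × PySem.Set Int × PySem.Set Int) (p : Int × Int) :
    List Int × PySem.Set Int × PySem.Set Int :=
  if p.2 != 0 && !(PySem.Set.contains st.2.1 p.1) then
    (st.1 ++ [p.1], PySem.Set.add st.2.1 p.1, PySem.Set.add st.2.2 p.1)
  else st

-- A's 'while queue:' loop; adj_matrix[current] is exact via pyGetD under Pre_ (in-range there)
def pvA_loop (adj : List (List Int)) : Nat → List Int → PySem.Set Int → PySem.Set Int → PySem.Set Int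
  | 0, _, _, reach => reach
  | _ + 1, [], _, reach => reach
  | fuel + 1, cur :: queue, visited, reach =>
    let st := (PySem.List.enumerate (PySem.List.pyGetD adj cur [])).foldl pvA_inner (queue, visited, reach)
    pvA_loop adj fuel st.1 st.2.1 st.2.2

def find_all_path_nodes (adj_matrix : List (List Int)) (start : Int) (end_ : Int) : List Int :=
  let reach_from_start := pvA_loop adj_matrix (pvFuel adj_matrix) [start]
      (PySem.Set.ofList [start]) (PySem.Set.ofList [start])
  let reach_from_end := pvA_loop adj_matrix (pvFuel adj_matrix) [end_]
      (PySem.Set.ofList [end_]) (PySem.Set.ofList [end_])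
  PySem.Set.diff
    (PySem.Set.diff (PySem.Set.inter reach_from_start reach_from_end) (PySem.Set.ofList [start]))
    (PySem.Set.ofList [end_])

-- ===== PORT B =====

-- '[nb for nb, w in enumerate(adj_matrix[node]) if w != 0]' (B's inner comprehension)
def pvNbrs (adj : List (List Int)) (node : Int) : List Int :=
  ((PySem.List.enumerate (PySem.List.pyGetD adj node [])).filter (fun p => p.2 != 0)).map Prod.fst

-- 'expanded = order + [nb for node in order for nb, w in enumerate(adj_matrix[node]) if w != 0]'
def pvB_expand (adj : List (List Int)) (order : List Int) : List Int :=
  order ++ order.flatMap (pvNbrs adj)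

-- B's 'while True:' fixpoint loop (fuel is a totality guard only; length grows each round)
def pvB_closure (adj : List (List Int)) : Nat → List Int → List Int
  | 0, order => order
  | fuel + 1, order =>
    let new_order := PySem.List.dedup (pvB_expand adj order)
    if new_order.length = order.length then new_order else pvB_closure adj fuel new_order

def find_all_path_nodes_alt (adj_matrix : List (List Int)) (start : Int) (end_ : Int) : List Int :=
  let reach_start := pvB_closure adj_matrix (pvFuel adj_matrix) [start]
  let reach_end := PySem.Set.ofList (pvB_closure adj_matrix (pvFuel adj_matrix) [end_])
  PySem.Set.ofList (reach_start.filter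
    (fun v => PySem.Set.contains reach_end v && v != start && v != end_))

-- ===== PRECONDITION & SPEC =====

-- Pre_ excludes inputs where Python A raises IndexError (start/end not valid indices, or a
-- reachable nonzero entry beyond the square range); it conservatively also excludes matrices
-- whose nonzero out-of-square entries are unreachable, on which A still returns (see cites).
def Pre_find_all_path_nodes (adj_matrix : List (List Int)) (start : Int) (end_ : Int) : Prop :=
  PySem.Raise.InRange adj_matrix.length start ∧ PySem.Raise.InRange adj_matrix.length end_ ∧
  ∀ row ∈ adj_matrix, ∀ j : Nat, j < row.length → adj_matrix.length ≤ j → row.getD j 0 = 0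
instance (adj_matrix : List (List Int)) (start : Int) (end_ : Int) : Decidable (Pre_find_all_path_nodes adj_matrix start end_) := by unfold Pre_find_all_path_nodes; infer_instance

def pvWitness_find_all_path_nodes : List (List Int) × Int × Int := ([[0, 1], [1, 0]], 0, 1)

def Spec_find_all_path_nodes (adj_matrix : List (List Int)) (start : Int) (end_ : Int) (out : List Int) : Prop := out = find_all_path_nodes_alt adj_matrix start end_
instance (adj_matrix : List (List Int)) (start : Int) (end_ : Int) (out : List Int) : Decidable (Spec_find_all_path_nodes adj_matrix start end_ out) := by unfold Spec_find_all_path_nodes; infer_instance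

-- ===== CLAIM (what is proved, stated in full; the proofs are below) =====
def Claim_equal_find_all_path_nodes : Prop := ∀ (adj_matrix : List (List Int)) (start : Int) (end_ : Int), Dom_find_all_path_nodes adj_matrix start end_ → Pre_find_all_path_nodes adj_matrix start end_ → Spec_find_all_path_nodes adj_matrix start end_ (find_all_path_nodes adj_matrix start end_)

-- ===== LEMMAS AND PROOFS =====

-- Proof-side bridge: a frontier-at-a-time BFS loop. A's queue loop is shown equal to it
-- (pvMain), and B's dedup fixpoint is shown equal to it too (pvCloseEq).

-- one neighbor step of the bridge loop; state = (new nodes, seen)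
def pvB_inner (st : List Int × PySem.Set Int) (p : Int × Int) : List Int × PySem.Set Int :=
  if p.2 != 0 && !(PySem.Set.contains st.2 p.1) then
    (st.1 ++ [p.1], PySem.Set.add st.2 p.1)
  else st

def pvB_node (adj : List (List Int)) (st : List Int × PySem.Set Int) (cur : Int) :
    List Int × PySem.Set Int :=
  (PySem.List.enumerate (PySem.List.pyGetD adj cur [])).foldl pvB_inner st

def pvB_loop (adj : List (List Int)) : Nat → List Int → PySem.Set Int → PySem.Set Int
  | 0, _, seen => seen
  | _ + 1, [], seen => seen
  | fuel + 1, cur :: frontier, seen =>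
    let st := (cur :: frontier).foldl (pvB_node adj) ([], seen)
    pvB_loop adj fuel st.1 st.2

-- accumulator lemma for the inner fold
lemma pvFold2_acc (l : List (Int × Int)) : ∀ (ns : List Int) (v : PySem.Set Int),
    l.foldl pvB_inner (ns, v) =
      (ns ++ (l.foldl pvB_inner ([], v)).1, (l.foldl pvB_inner ([], v)).2) := by
  induction l with
  | nil => intro ns v; simp
  | cons p l ih =>
    intro ns v
    simp only [List.foldl_cons, pvB_inner]
    by_cases h : (p.2 != 0 && !(PySem.Set.contains v p.1)) = true
    · simp only [h, if_true, List.nil_append]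
      rw [ih (ns ++ [p.1]), ih [p.1]]
      simp
    · simp only [h]
      exact ih ns v

-- A's inner fold with visited = reachability is the bridge inner fold on both set components
lemma pvFold3_eq (l : List (Int × Int)) : ∀ (q : List Int) (v : PySem.Set Int),
    l.foldl pvA_inner (q, v, v) =
      (q ++ (l.foldl pvB_inner ([], v)).1,
       (l.foldl pvB_inner ([], v)).2, (l.foldl pvB_inner ([], v)).2) := by
  induction l with
  | nil => intro q v; simp
  | cons p l ih =>
    intro q v
    simp only [List.foldl_cons, pvA_inner, pvB_inner]
    by_cases h : (p.2 != 0 && !(PySem.Set.contains v p.1)) = true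
    · simp only [h, if_true, List.nil_append]
      rw [ih (q ++ [p.1]), pvFold2_acc _ [p.1]]
      simp
    · simp only [h]
      exact ih q v

def pvNews (adj : List (List Int)) (v : PySem.Set Int) (cur : Int) : List Int :=
  ((PySem.List.enumerate (PySem.List.pyGetD adj cur [])).foldl pvB_inner ([], v)).1

def pvSeen (adj : List (List Int)) (v : PySem.Set Int) (cur : Int) : PySem.Set Int :=
  ((PySem.List.enumerate (PySem.List.pyGetD adj cur [])).foldl pvB_inner ([], v)).2

lemma pvB_node_eq (adj : List (List Int)) (ns : List Int) (v : PySem.Set Int) (cur : Int) :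
    pvB_node adj (ns, v) cur = (ns ++ pvNews adj v cur, pvSeen adj v cur) := by
  unfold pvB_node pvNews pvSeen
  exact pvFold2_acc _ ns v

-- accumulator lemma for the outer (frontier) fold
lemma pvFoldOut_acc (adj : List (List Int)) (fr : List Int) : ∀ (ns : List Int) (v : PySem.Set Int),
    fr.foldl (pvB_node adj) (ns, v) =
      (ns ++ (fr.foldl (pvB_node adj) ([], v)).1, (fr.foldl (pvB_node adj) ([], v)).2) := by
  induction fr with
  | nil => intro ns v; simp
  | cons c fr ih =>
    intro ns v
    simp only [List.foldl_cons, pvB_node_eq, List.nil_append]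
    rw [ih (ns ++ pvNews adj v c), ih (pvNews adj v c)]
    simp

-- A's loop consumes a frontier prefix of its queue exactly as one bridge frontier pass
lemma pvA_consume (adj : List (List Int)) (fr : List Int) :
    ∀ (f : Nat) (q : List Int) (v : PySem.Set Int),
    pvA_loop adj (fr.length + f) (fr ++ q) v v =
      pvA_loop adj f (q ++ (fr.foldl (pvB_node adj) ([], v)).1)
        (fr.foldl (pvB_node adj) ([], v)).2 (fr.foldl (pvB_node adj) ([], v)).2 := by
  induction fr with
  | nil => intro f q v; simp
  | cons c fr ih =>
    intro f q v
    have hfuel : (c :: fr).length + f = (fr.length + f) + 1 := by simp; omega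
    rw [hfuel]
    show pvA_loop adj ((fr.length + f) + 1) (c :: (fr ++ q)) v v = _
    simp only [pvA_loop]
    rw [show ((PySem.List.enumerate (PySem.List.pyGetD adj c [])).foldl pvA_inner (fr ++ q, v, v)) =
        (fr ++ q ++ pvNews adj v c, pvSeen adj v c, pvSeen adj v c) from by
      rw [pvFold3_eq]; rfl]
    simp only [List.foldl_cons, pvB_node_eq adj [] v c, List.nil_append]
    rw [pvFoldOut_acc adj fr (pvNews adj v c) (pvSeen adj v c)]
    have := ih f (q ++ pvNews adj v c) (pvSeen adj v c)
    simp only [List.append_assoc] at this ⊢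
    exact this

-- every row the ports ever read is no longer than pvRowLenSum
lemma pvRowLenSum_eq (adj : List (List Int)) : pvRowLenSum adj = (adj.map List.length).sum := by
  have h : ∀ (l : List (List Int)) (acc : Nat),
      l.foldl (fun a r => a + r.length) acc = acc + (l.map List.length).sum := by
    intro l
    induction l with
    | nil => intro acc; simp
    | cons r l ih => intro acc; simp [ih]; omega
  simpa using h adj 0

lemma pvRow_le (adj : List (List Int)) (cur : Int) :
    (PySem.List.pyGetD adj cur ([] : List Int)).length ≤ pvRowLenSum adj := by
  rcases h : PySem.List.pyGet? adj cur with _ | row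
  · rw [PySem.List.pyGetD_of_none adj cur [] h]
    simp
  · have hmem : row ∈ adj := PySem.List.mem_of_pyGet?_eq_some adj h
    have : PySem.List.pyGetD adj cur ([] : List Int) = row := by
      simp [PySem.List.pyGetD, h]
    rw [this, pvRowLenSum_eq]
    exact List.single_le_sum (by simp) _ (List.mem_map_of_mem hmem)

-- invariants of one inner pass: seen extends by exactly the new nodes, stays nodup,
-- and every new node is a small natural number
lemma pvFold2_inv (l : List (Int × Int)) : ∀ (v : PySem.Set Int), v.Nodup →
    (l.foldl pvB_inner ([], v)).2 = v ++ (l.foldl pvB_inner ([], v)).1 ∧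
    ((l.foldl pvB_inner ([], v)).2).Nodup ∧
    ∀ x ∈ (l.foldl pvB_inner ([], v)).1, x ∈ l.map Prod.fst := by
  induction l with
  | nil => intro v hv; simpa using hv
  | cons p l ih =>
    intro v hv
    simp only [List.foldl_cons, pvB_inner]
    by_cases h : (p.2 != 0 && !(PySem.Set.contains v p.1)) = true
    · simp only [h, if_true, List.nil_append]
      have h' : ¬p.2 = 0 ∧ p.1 ∉ v := by simpa using h
      have hnm : p.1 ∉ v := h'.2
      have hadd : PySem.Set.add v p.1 = v ++ [p.1] := PySem.Set.add_of_not_mem hnm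
      have hnd : (v ++ [p.1]).Nodup :=
        hv.append (List.nodup_singleton _)
          (by intro a ha hb; simp at hb; subst hb; exact hnm ha)
      rw [pvFold2_acc l [p.1]]
      obtain ⟨e1, e2, e3⟩ := ih (PySem.Set.add v p.1) (hadd ▸ hnd)
      refine ⟨?_, e2, ?_⟩
      · rw [e1, hadd]; simp
      · intro x hx
        simp only [List.mem_append, List.mem_singleton] at hx
        rcases hx with hx | hx
        · simp [hx]
        · simp only [List.map_cons, List.mem_cons]
          exact Or.inr (e3 x hx)
    · simp only [h]
      obtain ⟨e1, e2, e3⟩ := ih v hv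
      exact ⟨e1, e2, fun x hx => by
        simp only [List.map_cons, List.mem_cons]
        exact Or.inr (e3 x hx)⟩

lemma pvFoldOut_inv (adj : List (List Int)) (fr : List Int) : ∀ (v : PySem.Set Int), v.Nodup →
    (fr.foldl (pvB_node adj) ([], v)).2 = v ++ (fr.foldl (pvB_node adj) ([], v)).1 ∧
    ((fr.foldl (pvB_node adj) ([], v)).2).Nodup ∧
    ∀ x ∈ (fr.foldl (pvB_node adj) ([], v)).1,
      ∃ j : Nat, x = (j : Int) ∧ j < pvRowLenSum adj := by
  induction fr with
  | nil => intro v hv; simpa using hv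
  | cons c fr ih =>
    intro v hv
    simp only [List.foldl_cons, pvB_node_eq adj [] v c, List.nil_append]
    rw [pvFoldOut_acc adj fr (pvNews adj v c) (pvSeen adj v c)]
    obtain ⟨e1, e2, e3⟩ := pvFold2_inv _ v hv
    have hnews : ∀ x ∈ pvNews adj v c, ∃ j : Nat, x = (j : Int) ∧ j < pvRowLenSum adj := by
      intro x hx
      have hx' := e3 x hx
      rw [PySem.List.map_fst_enumerate] at hx'
      rw [PySem.List.mem_pyRange_one] at hx'
      obtain ⟨h0, h1⟩ := hx'
      have hlen := pvRow_le adj c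
      exact ⟨x.toNat, by omega, by omega⟩
    obtain ⟨f1, f2, f3⟩ := ih (pvSeen adj v c) (by rw [pvSeen]; exact e2)
    have hseen : pvSeen adj v c = v ++ pvNews adj v c := e1
    refine ⟨?_, f2, ?_⟩
    · rw [f1, hseen]; simp
    · intro x hx
      simp only [List.mem_append] at hx
      rcases hx with hx | hx
      · exact hnews x hx
      · exact f3 x hx

-- candidate universe: every node either port can ever discover
def pvU (adj : List (List Int)) : List Int :=
  (List.range (pvRowLenSum adj)).map Int.ofNat

lemma pvU_nodup (adj : List (List Int)) : (pvU adj).Nodup :=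
  List.Nodup.map (fun _ _ h => Int.ofNat.inj h) List.nodup_range

lemma mem_pvU (adj : List (List Int)) (x : Int) :
    x ∈ pvU adj ↔ ∃ j : Nat, x = (j : Int) ∧ j < pvRowLenSum adj := by
  simp only [pvU, List.mem_map, List.mem_range, Int.ofNat_eq_natCast]
  constructor
  · rintro ⟨j, hj, rfl⟩; exact ⟨j, rfl, hj⟩
  · rintro ⟨j, rfl, hj⟩; exact ⟨j, hj, rfl⟩

-- potential: how many candidate nodes are not yet seen
def pvUr (adj : List (List Int)) (v : List Int) : Nat :=
  ((pvU adj).filter (fun x => !(v.contains x))).length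

lemma pvUr_le (adj : List (List Int)) (v : List Int) : pvUr adj v ≤ pvRowLenSum adj := by
  unfold pvUr
  calc _ ≤ (pvU adj).length := List.length_filter_le _ _
    _ = pvRowLenSum adj := by simp [pvU]

lemma pvUr_append (adj : List (List Int)) (v news : List Int)
    (hnd : (v ++ news).Nodup)
    (hsub : ∀ x ∈ news, ∃ j : Nat, x = (j : Int) ∧ j < pvRowLenSum adj) :
    pvUr adj (v ++ news) + news.length = pvUr adj v := by
  have hUnd : (pvU adj).Nodup := pvU_nodup adj
  obtain ⟨hvnd, hnnd, hdisj⟩ := List.nodup_append.1 hnd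
  have hsplit := List.length_eq_length_filter_add
    (l := (pvU adj).filter (fun x => !(v.contains x))) (fun x => news.contains x)
  have hfst : (((pvU adj).filter (fun x => !(v.contains x))).filter
      (fun x => news.contains x)).length = news.length := by
    apply List.Perm.length_eq
    apply (List.perm_ext_iff_of_nodup ((hUnd.filter _).filter _) hnnd).2
    intro a
    simp only [List.mem_filter, List.contains_eq_mem, Bool.not_eq_eq_eq_not, Bool.not_true,
      decide_eq_false_iff_not, decide_eq_true_eq]
    constructor
    · rintro ⟨⟨-, -⟩, ha⟩; exact ha
    · intro ha
      refine ⟨⟨(mem_pvU adj a).2 (hsub a ha), fun hv => hdisj a hv a ha rfl⟩, ha⟩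
  have hsnd : (((pvU adj).filter (fun x => !(v.contains x))).filter
      (fun x => !(news.contains x)))
      = (pvU adj).filter (fun x => !((v ++ news).contains x)) := by
    rw [List.filter_filter]
    apply List.filter_congr
    intro a _
    simp [List.contains_eq_mem, Bool.and_comm]
  unfold pvUr
  rw [hsplit, hfst, hsnd]
  omega

-- the central A-side equivalence: with enough fuel, A's queue loop and the bridge
-- frontier loop compute the same seen set (same list, same order)
lemma pvMain (adj : List (List Int)) : ∀ (fB : Nat) (fr : List Int) (v : PySem.Set Int) (fA : Nat),
    v.Nodup → fr.length + pvUr adj v < fA → (pvUr adj v < fB ∨ fr = []) →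
    pvA_loop adj fA fr v v = pvB_loop adj fB fr v := by
  intro fB
  induction fB with
  | zero =>
    intro fr v fA _ hA hB
    have hfr : fr = [] := by
      rcases hB with h | h
      · omega
      · exact h
    subst hfr
    obtain ⟨fA', rfl⟩ : ∃ k, fA = k + 1 := ⟨fA - 1, by omega⟩
    rfl
  | succ f ih =>
    intro fr v fA hv hA hB
    cases fr with
    | nil =>
      obtain ⟨fA', rfl⟩ : ∃ k, fA = k + 1 := ⟨fA - 1, by omega⟩
      rfl
    | cons c fr =>
      obtain ⟨e1, e2, e3⟩ := pvFoldOut_inv adj (c :: fr) v hv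
      set st := (c :: fr).foldl (pvB_node adj) ([], v) with hst
      obtain ⟨fA', rfl⟩ : ∃ k, fA = (c :: fr).length + k := ⟨fA - (c :: fr).length, by
        simp only [List.length_cons] at hA ⊢; omega⟩
      have hcons : pvA_loop adj ((c :: fr).length + fA') (c :: fr) v v =
          pvA_loop adj fA' st.1 st.2 st.2 := by
        have := pvA_consume adj (c :: fr) fA' [] v
        simpa using this
      rw [hcons]
      have hBstep : pvB_loop adj (f + 1) (c :: fr) v = pvB_loop adj f st.1 st.2 := by
        simp only [pvB_loop]
        rw [hst]
      rw [hBstep]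
      have hur : pvUr adj st.2 + st.1.length = pvUr adj v := by
        rw [e1] at e2 ⊢
        exact pvUr_append adj v st.1 e2 e3
      have hnd2 : st.2.Nodup := by rw [e1] at e2 ⊢; exact e2
      apply ih st.1 st.2 fA' hnd2
      · omega
      · by_cases hn : st.1 = []
        · exact Or.inr hn
        · left
          have hlp : 0 < st.1.length := List.length_pos_of_ne_nil hn
          have hBv : pvUr adj v < f + 1 := by
            rcases hB with h | h
            · exact h
            · exact absurd h (by simp)
          omega

-- the bridge loop keeps the seen set duplicate-free
lemma pvB_nodup (adj : List (List Int)) : ∀ (f : Nat) (fr : List Int) (v : PySem.Set Int),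
    v.Nodup → (pvB_loop adj f fr v).Nodup := by
  intro f
  induction f with
  | zero => intro fr v hv; exact hv
  | succ f ih =>
    intro fr v hv
    cases fr with
    | nil => exact hv
    | cons c fr =>
      simp only [pvB_loop]
      obtain ⟨e1, e2, _⟩ := pvFoldOut_inv adj (c :: fr) v hv
      exact ih _ _ (by rw [e1] at e2 ⊢; exact e2)

-- ===== B-side bridge: the dedup fixpoint equals the bridge frontier loop =====

-- the inner seen fold is folding Set.add over the nonzero-neighbor list
lemma pvInner_add (l : List (Int × Int)) : ∀ (v : PySem.Set Int),
    (l.foldl pvB_inner ([], v)).2 =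
      ((l.filter (fun p => p.2 != 0)).map Prod.fst).foldl PySem.Set.add v := by
  induction l with
  | nil => intro v; rfl
  | cons p l ih =>
    intro v
    by_cases h0 : (p.2 != 0) = true
    · by_cases h1 : (PySem.Set.contains v p.1) = true
      · have hm : p.1 ∈ v := List.mem_of_elem_eq_true h1
        have hadd : PySem.Set.add v p.1 = v := by
          simp [PySem.Set.add, PySem.Set.contains, hm]
        simp only [List.foldl_cons, pvB_inner, h0, h1, Bool.not_true, Bool.and_false,
          Bool.false_eq_true, if_false, List.filter_cons, if_true,
          List.map_cons, hadd]
        exact ih v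
      · have h1' : (PySem.Set.contains v p.1) = false := by
          cases hc : PySem.Set.contains v p.1
          · rfl
          · exact absurd hc h1
        simp only [List.foldl_cons, pvB_inner, h0, h1', Bool.not_false, Bool.and_true,
          if_true, List.nil_append, List.filter_cons, List.map_cons,
          List.foldl_cons]
        rw [pvFold2_acc l [p.1]]
        exact ih (PySem.Set.add v p.1)
    · have h0' : (p.2 != 0) = false := by
        cases hc : p.2 != 0
        · rfl
        · exact absurd hc h0
      simp only [List.foldl_cons, pvB_inner, h0', Bool.false_and, Bool.false_eq_true,
        if_false, List.filter_cons]
      exact ih v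

lemma pvSeen_add (adj : List (List Int)) (v : PySem.Set Int) (c : Int) :
    pvSeen adj v c = (pvNbrs adj c).foldl PySem.Set.add v := by
  unfold pvSeen pvNbrs
  exact pvInner_add _ v

-- the outer seen fold is folding Set.add over the concatenated neighbor lists
lemma pvOuter_add (adj : List (List Int)) (fr : List Int) : ∀ (v : PySem.Set Int),
    (fr.foldl (pvB_node adj) ([], v)).2 =
      (fr.flatMap (pvNbrs adj)).foldl PySem.Set.add v := by
  induction fr with
  | nil => intro v; rfl
  | cons c fr ih =>
    intro v
    simp only [List.foldl_cons, pvB_node_eq adj [] v c, List.nil_append, List.flatMap_cons,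
      List.foldl_append]
    rw [pvFoldOut_acc adj fr (pvNews adj v c) (pvSeen adj v c), ih (pvSeen adj v c),
      pvSeen_add]

-- folding Set.add over elements already present changes nothing
lemma pvAdd_skip (xs : List Int) : ∀ (v : PySem.Set Int), (∀ x ∈ xs, x ∈ v) →
    xs.foldl PySem.Set.add v = v := by
  induction xs with
  | nil => intro v _; rfl
  | cons x xs ih =>
    intro v h
    have hm : x ∈ v := h x (by simp)
    have hx : PySem.Set.add v x = v := by
      simp [PySem.Set.add, PySem.Set.contains, hm]
    simp only [List.foldl_cons, hx]
    exact ih v (fun y hy => h y (by simp [hy]))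

-- membership after folding Set.add
lemma pvMem_foldl_add (xs : List Int) : ∀ (v : PySem.Set Int) (x : Int),
    (x ∈ v ∨ x ∈ xs) → x ∈ xs.foldl PySem.Set.add v := by
  induction xs with
  | nil =>
    intro v x h
    rcases h with h | h
    · exact h
    · cases h
  | cons y xs ih =>
    intro v x h
    simp only [List.foldl_cons]
    apply ih
    rcases h with h | h
    · left; exact (PySem.Set.mem_add _ _ _).2 (Or.inl h)
    · rcases List.mem_cons.1 h with rfl | h
      · left; exact (PySem.Set.mem_add _ _ _).2 (Or.inr rfl)
      · right; exact h

-- dedup of a nodup prefix plus a tail is folding Set.add over the tail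
lemma pvDedup_append (v M : List Int) (hv : v.Nodup) :
    PySem.List.dedup (v ++ M) = M.foldl PySem.Set.add v := by
  rw [PySem.List.dedup_eq_ofList, PySem.Set.ofList_eq_foldl, List.foldl_append]
  have : v.foldl PySem.Set.add [] = PySem.Set.ofList v := by
    rw [PySem.Set.ofList_eq_foldl]
  rw [this, PySem.Set.ofList_eq_self_of_nodup v hv]

-- one dedup-expansion round from a closed state equals one bridge frontier pass
lemma pvStep_eq (adj : List (List Int)) (processed fr : List Int)
    (hnd : (processed ++ fr).Nodup)
    (hcl : ∀ p ∈ processed, ∀ nb ∈ pvNbrs adj p, nb ∈ processed ++ fr) :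
    PySem.List.dedup (pvB_expand adj (processed ++ fr)) =
      (fr.foldl (pvB_node adj) ([], processed ++ fr)).2 := by
  unfold pvB_expand
  rw [pvDedup_append _ _ hnd, List.flatMap_append, List.foldl_append]
  have hskip : (processed.flatMap (pvNbrs adj)).foldl PySem.Set.add (processed ++ fr)
      = processed ++ fr := by
    apply pvAdd_skip
    intro x hx
    obtain ⟨p, hp, hnb⟩ := List.mem_flatMap.1 hx
    exact hcl p hp x hnb
  rw [hskip, pvOuter_add]

-- one step of the bridge loop, uniformly in the frontier's shape
lemma pvB_loop_succ (adj : List (List Int)) (f : Nat) (fr : List Int) (seen : PySem.Set Int) :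
    pvB_loop adj (f + 1) fr seen =
      pvB_loop adj f (fr.foldl (pvB_node adj) ([], seen)).1
        (fr.foldl (pvB_node adj) ([], seen)).2 := by
  cases fr with
  | nil => cases f <;> rfl
  | cons c fr => rfl

-- the dedup fixpoint loop equals the bridge frontier loop (same fuel)
lemma pvCloseEq (adj : List (List Int)) : ∀ (f : Nat) (processed fr : List Int),
    (processed ++ fr).Nodup →
    (∀ p ∈ processed, ∀ nb ∈ pvNbrs adj p, nb ∈ processed ++ fr) →
    pvB_closure adj f (processed ++ fr) = pvB_loop adj f fr (processed ++ fr) := by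
  intro f
  induction f with
  | zero =>
    intro processed fr _ _
    cases fr <;> rfl
  | succ f ih =>
    intro processed fr hnd hcl
    obtain ⟨e1, e2, _⟩ := pvFoldOut_inv adj fr (processed ++ fr) hnd
    set st := fr.foldl (pvB_node adj) ([], processed ++ fr) with hst
    have hstep : PySem.List.dedup (pvB_expand adj (processed ++ fr)) = st.2 :=
      pvStep_eq adj processed fr hnd hcl
    have hlen : st.2.length = (processed ++ fr).length + st.1.length := by
      rw [e1, List.length_append]
    rw [pvB_loop_succ adj f fr (processed ++ fr), ← hst]
    simp only [pvB_closure]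
    rw [hstep]
    by_cases hnil : st.1 = []
    · rw [if_pos (by rw [hlen, hnil]; simp)]
      rw [hnil]
      cases f <;> rfl
    · have hlp : 0 < st.1.length := List.length_pos_of_ne_nil hnil
      rw [if_neg (by omega)]
      have hclNew : ∀ p ∈ processed ++ fr, ∀ nb ∈ pvNbrs adj p, nb ∈ (processed ++ fr) ++ st.1 := by
        intro p hp nb hnb
        rcases List.mem_append.1 hp with hp' | hp'
        · exact List.mem_append_left _ (hcl p hp' nb hnb)
        · have : nb ∈ st.2 := by
            rw [hst, pvOuter_add]
            exact pvMem_foldl_add _ _ _ (Or.inr (List.mem_flatMap.2 ⟨p, hp', hnb⟩))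
          rw [e1] at this
          exact this
      have hih := ih (processed ++ fr) st.1 (by rw [← e1]; exact e2) hclNew
      rw [← e1] at hih
      exact hih

-- from a singleton start, A's reachability list equals B's closure list
lemma pvReach_eq (adj : List (List Int)) (s : Int) :
    pvA_loop adj (pvFuel adj) [s] (PySem.Set.ofList [s]) (PySem.Set.ofList [s]) =
      pvB_closure adj (pvFuel adj) [s] := by
  have hof : PySem.Set.ofList [s] = [s] :=
    PySem.Set.ofList_eq_self_of_nodup [s] (by simp)
  rw [hof]
  have hA : pvA_loop adj (pvFuel adj) [s] [s] [s] = pvB_loop adj (pvFuel adj) [s] [s] := by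
    apply pvMain adj (pvFuel adj) [s] [s] (pvFuel adj) (by simp)
    · have := pvUr_le adj [s]
      unfold pvFuel
      simp only [List.length_cons, List.length_nil]
      omega
    · left
      have := pvUr_le adj [s]
      unfold pvFuel
      omega
  have hB : pvB_closure adj (pvFuel adj) [s] = pvB_loop adj (pvFuel adj) [s] [s] := by
    have := pvCloseEq adj (pvFuel adj) [] [s] (by simp) (by simp)
    simpa using this
  rw [hA, hB]

-- the closure result is duplicate-free
lemma pvClosure_nodup (adj : List (List Int)) (s : Int) :
    (pvB_closure adj (pvFuel adj) [s]).Nodup := by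
  have hB : pvB_closure adj (pvFuel adj) [s] = pvB_loop adj (pvFuel adj) [s] [s] := by
    have := pvCloseEq adj (pvFuel adj) [] [s] (by simp) (by simp)
    simpa using this
  rw [hB]
  exact pvB_nodup adj _ _ _ (by simp)

-- ===== VERDICT (by name: the statement is the Claim_ definition above) =====
theorem find_all_path_nodes_spec : Claim_equal_find_all_path_nodes := by
  intro adj start end_ _ _
  unfold Spec_find_all_path_nodes find_all_path_nodes find_all_path_nodes_alt
  rw [pvReach_eq adj start, pvReach_eq adj end_]
  set rs := pvB_closure adj (pvFuel adj) [start] with hrs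
  set re := pvB_closure adj (pvFuel adj) [end_] with hre
  have hrsnd : rs.Nodup := pvClosure_nodup adj start
  have hrend : re.Nodup := pvClosure_nodup adj end_
  have hofe : PySem.Set.ofList re = re := PySem.Set.ofList_eq_self_of_nodup re hrend
  rw [hofe]
  have hof : PySem.Set.ofList (rs.filter
      (fun v => PySem.Set.contains re v && v != start && v != end_)) =
      rs.filter (fun v => PySem.Set.contains re v && v != start && v != end_) :=
    PySem.Set.ofList_eq_self_of_nodup _ (hrsnd.filter _)
  rw [hof]
  show PySem.Set.diff (PySem.Set.diff (PySem.Set.inter rs re) (PySem.Set.ofList [start]))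
      (PySem.Set.ofList [end_]) = _
  unfold PySem.Set.diff PySem.Set.inter
  rw [List.filter_filter, List.filter_filter]
  apply List.filter_congr
  intro a _
  simp [PySem.Set.ofList, PySem.Set.contains, bne]
  by_cases h1 : a = start <;> by_cases h2 : a = end_ <;> by_cases h3 : a ∈ re <;>
    simp [h1, h2, h3]
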